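-- pv_equiv track=rewrite | github.com/kwaytrades/sms | personality_engine.py | _assess_vocabulary_level
-- ===== SOURCE A (Python) =====
-- def _assess_vocabulary_level(message: str) -> str:
--     """Assess vocabulary sophistication level"""
--     basic_words = ['good', 'bad', 'big', 'small', 'nice', 'okay', 'cool', 'great']
--     advanced_words = ['sophisticated', 'comprehensive', 'substantial', 'exceptional', 'intricate', 'nuanced']
--     technical_words = ['volatility', 'correlation', 'diversification', 'allocation', 'optimization']
--
--     words = message.lower().split()
--
--     basic_count = sum(1 for word in words if word in basic_words)
--     advanced_count = sum(1 for word in words if word in advanced_words)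
--     technical_count = sum(1 for word in words if word in technical_words)
--
--     if technical_count > 0:
--         return 'technical'
--     elif advanced_count > basic_count:
--         return 'advanced'
--     elif basic_count > 0:
--         return 'basic'
--     else:
--         return 'intermediate'
-- ===== SOURCE B (Python) =====
-- def _assess_vocabulary_level(message: str) -> str:
--     """Assess vocabulary sophistication level (single-pass dict lookup)."""
--     category = {
--         'good': 'basic', 'bad': 'basic', 'big': 'basic', 'small': 'basic',
--         'nice': 'basic', 'okay': 'basic', 'cool': 'basic', 'great': 'basic',
--         'sophisticated': 'advanced', 'comprehensive': 'advanced',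
--         'substantial': 'advanced', 'exceptional': 'advanced',
--         'intricate': 'advanced', 'nuanced': 'advanced',
--         'volatility': 'technical', 'correlation': 'technical',
--         'diversification': 'technical', 'allocation': 'technical',
--         'optimization': 'technical',
--     }
--     basic_count = advanced_count = technical_count = 0
--     for word in message.lower().split():
--         cat = category.get(word)
--         if cat == 'basic':
--             basic_count += 1
--         elif cat == 'advanced':
--             advanced_count += 1
--         elif cat == 'technical':
--             technical_count += 1
--     if technical_count > 0:
--         return 'technical'
--     if advanced_count > basic_count:
--         return 'advanced'
--     if basic_count > 0:
--         return 'basic'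
--     return 'intermediate'
-- ===== Notes on version B (the rewrite author's own statement) =====
-- stated objective: alternative
-- what changed: Replaces A's three separate membership-counting passes over the word list (each with a linear scan of a keyword list) by one dict mapping keyword to category and a single pass over the words updating three counters; the decision ladder is unchanged.
import Mathlib
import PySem

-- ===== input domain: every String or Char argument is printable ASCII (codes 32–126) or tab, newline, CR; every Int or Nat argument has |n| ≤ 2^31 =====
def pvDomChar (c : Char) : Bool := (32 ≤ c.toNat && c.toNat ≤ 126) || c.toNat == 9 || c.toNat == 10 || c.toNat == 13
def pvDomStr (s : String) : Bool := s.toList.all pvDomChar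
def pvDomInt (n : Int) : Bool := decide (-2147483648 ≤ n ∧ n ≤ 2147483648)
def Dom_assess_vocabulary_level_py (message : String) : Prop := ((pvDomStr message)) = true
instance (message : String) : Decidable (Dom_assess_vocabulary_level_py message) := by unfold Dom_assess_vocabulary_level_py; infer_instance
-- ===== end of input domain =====

-- B replaces A's three membership-counting passes by one keyword→category dict and a single
-- pass over the words updating three counters (alternative decomposition, same decision ladder).


-- ===== PORT A =====
def pvBasicWords : List String := ["good", "bad", "big", "small", "nice", "okay", "cool", "great"]
def pvAdvancedWords : List String := ["sophisticated", "comprehensive", "substantial", "exceptional", "intricate", "nuanced"]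
def pvTechnicalWords : List String := ["volatility", "correlation", "diversification", "allocation", "optimization"]

def assess_vocabulary_level_py (message : String) : String :=
  let words := PySem.Str.split₀ (PySem.Str.lower message)
  let basic_count : Int := (words.map (fun word => if word ∈ pvBasicWords then (1 : Int) else 0)).sum
  let advanced_count : Int := (words.map (fun word => if word ∈ pvAdvancedWords then (1 : Int) else 0)).sum
  let technical_count : Int := (words.map (fun word => if word ∈ pvTechnicalWords then (1 : Int) else 0)).sum
  if technical_count > 0 then "technical"
  else if advanced_count > basic_count then "advanced"
  else if basic_count > 0 then "basic"
  else "intermediate"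

-- ===== PORT B =====
def pvCategory : PySem.Dict String String := PySem.Dict.ofList
  [("good", "basic"), ("bad", "basic"), ("big", "basic"), ("small", "basic"),
   ("nice", "basic"), ("okay", "basic"), ("cool", "basic"), ("great", "basic"),
   ("sophisticated", "advanced"), ("comprehensive", "advanced"),
   ("substantial", "advanced"), ("exceptional", "advanced"),
   ("intricate", "advanced"), ("nuanced", "advanced"),
   ("volatility", "technical"), ("correlation", "technical"),
   ("diversification", "technical"), ("allocation", "technical"),
   ("optimization", "technical")]

-- one loop iteration: look the word up, bump the matching counter (basic, advanced, technical)
def pvStep (acc : Int × Int × Int) (word : String) : Int × Int × Int :=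
  let cat := PySem.Dict.get? pvCategory word
  if cat = some "basic" then (acc.1 + 1, acc.2.1, acc.2.2)
  else if cat = some "advanced" then (acc.1, acc.2.1 + 1, acc.2.2)
  else if cat = some "technical" then (acc.1, acc.2.1, acc.2.2 + 1)
  else acc

def assess_vocabulary_level_py_alt (message : String) : String :=
  let counts := (PySem.Str.split₀ (PySem.Str.lower message)).foldl pvStep (0, 0, 0)
  if counts.2.2 > 0 then "technical"
  else if counts.2.1 > counts.1 then "advanced"
  else if counts.1 > 0 then "basic"
  else "intermediate"

-- ===== PRECONDITION & SPEC =====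
def Spec_assess_vocabulary_level_py (message : String) (out : String) : Prop := out = assess_vocabulary_level_py_alt message
instance (message : String) (out : String) : Decidable (Spec_assess_vocabulary_level_py message out) := by unfold Spec_assess_vocabulary_level_py; infer_instance

-- ===== CLAIM (what is proved, stated in full; the proofs are below) =====
def Claim_equal_assess_vocabulary_level_py : Prop := ∀ (message : String), Dom_assess_vocabulary_level_py message → Spec_assess_vocabulary_level_py message (assess_vocabulary_level_py message)

-- ===== LEMMAS AND PROOFS =====

-- one step of B's fold adds exactly A's three per-word 0/1 contributions
lemma pvStep_eq (acc : Int × Int × Int) (w : String) :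
    pvStep acc w =
      (acc.1 + (if w ∈ pvBasicWords then (1 : Int) else 0),
       acc.2.1 + (if w ∈ pvAdvancedWords then (1 : Int) else 0),
       acc.2.2 + (if w ∈ pvTechnicalWords then (1 : Int) else 0)) := by
  have hd : pvCategory = PySem.Dict.mk
      [("good", "basic"), ("bad", "basic"), ("big", "basic"), ("small", "basic"),
       ("nice", "basic"), ("okay", "basic"), ("cool", "basic"), ("great", "basic"),
       ("sophisticated", "advanced"), ("comprehensive", "advanced"),
       ("substantial", "advanced"), ("exceptional", "advanced"),
       ("intricate", "advanced"), ("nuanced", "advanced"),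
       ("volatility", "technical"), ("correlation", "technical"),
       ("diversification", "technical"), ("allocation", "technical"),
       ("optimization", "technical")] := by decide
  rw [pvStep, hd]
  simp only [PySem.Dict.get?_mk_cons, pvBasicWords, pvAdvancedWords, pvTechnicalWords,
    List.mem_cons, List.not_mem_nil, beq_iff_eq]
  by_cases h : w ∈ pvBasicWords ∨ w ∈ pvAdvancedWords ∨ w ∈ pvTechnicalWords
  · simp only [pvBasicWords, pvAdvancedWords, pvTechnicalWords, List.mem_cons,
      List.not_mem_nil, or_false] at h
    rcases h with ((h|h|h|h|h|h|h|h)|(h|h|h|h|h|h)|(h|h|h|h|h)) <;> subst h <;> simp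
  · simp only [pvBasicWords, pvAdvancedWords, pvTechnicalWords, List.mem_cons,
      List.not_mem_nil, or_false, not_or] at h
    obtain ⟨hb, ha, ht⟩ := h
    simp [hb.1, hb.2.1, hb.2.2.1, hb.2.2.2.1, hb.2.2.2.2.1, hb.2.2.2.2.2.1,
      hb.2.2.2.2.2.2.1, hb.2.2.2.2.2.2.2, ha.1, ha.2.1, ha.2.2.1, ha.2.2.2.1,
      ha.2.2.2.2.1, ha.2.2.2.2.2, ht.1, ht.2.1, ht.2.2.1, ht.2.2.2.1, ht.2.2.2.2,
      Ne.symm, PySem.Dict.get?]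

-- B's fold computes A's three sums
lemma pvFold_eq (ws : List String) (b a t : Int) :
    ws.foldl pvStep (b, a, t) =
      (b + (ws.map (fun w => if w ∈ pvBasicWords then (1 : Int) else 0)).sum,
       a + (ws.map (fun w => if w ∈ pvAdvancedWords then (1 : Int) else 0)).sum,
       t + (ws.map (fun w => if w ∈ pvTechnicalWords then (1 : Int) else 0)).sum) := by
  induction ws generalizing b a t with
  | nil => simp
  | cons w ws ih =>
    simp only [List.foldl_cons, pvStep_eq, List.map_cons, List.sum_cons, ih]
    ring_nf

-- ===== VERDICT (by name: the statement is the Claim_ definition above) =====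
theorem assess_vocabulary_level_py_spec : Claim_equal_assess_vocabulary_level_py := by
  intro message _
  unfold Spec_assess_vocabulary_level_py assess_vocabulary_level_py assess_vocabulary_level_py_alt
  simp only [pvFold_eq, zero_add]
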